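-- pv_equiv track=rewrite | github.com/jang9205/Programmers_Algorithm | LEVEL0/공 던지기.py | solution
-- ===== SOURCE A (Python) =====
-- def solution(numbers, k):
--     answer = 0
--     for i in range (k-1):
--         if answer < len(numbers) - 2:
--             answer += 2
--         elif answer == len(numbers) - 2:
--             answer = 0
--         elif answer == len(numbers) - 1:
--             answer = 1
--     return numbers[answer]
-- ===== SOURCE B (Python) =====
-- def solution(numbers, k):
--     # Closed form: after k-1 double-steps with wraparound the index is 2*(k-1) mod len,
--     # and no steps happen for k <= 1.
--     return numbers[2 * (max(k, 1) - 1) % len(numbers)]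
-- ===== Notes on version B (the rewrite author's own statement) =====
-- stated objective: faster
-- what changed: Replaced the O(k) step-by-step wraparound loop by the closed-form index 2*(max(k,1)-1) mod len(numbers).
import Mathlib
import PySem

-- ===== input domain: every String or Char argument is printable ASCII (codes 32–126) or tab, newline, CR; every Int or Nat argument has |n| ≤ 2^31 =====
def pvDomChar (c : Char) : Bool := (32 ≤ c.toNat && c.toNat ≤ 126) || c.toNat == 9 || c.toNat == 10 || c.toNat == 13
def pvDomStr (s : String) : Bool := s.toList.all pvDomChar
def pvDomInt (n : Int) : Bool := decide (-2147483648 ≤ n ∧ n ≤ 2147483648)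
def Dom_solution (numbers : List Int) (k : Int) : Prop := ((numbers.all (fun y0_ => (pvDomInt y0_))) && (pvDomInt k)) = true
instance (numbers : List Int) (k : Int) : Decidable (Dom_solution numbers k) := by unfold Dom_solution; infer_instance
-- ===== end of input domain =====

-- B replaces A's O(k) step loop by the closed-form index 2*(max(k,1)-1) mod len (faster, asymptotic).

-- ===== PORT A =====
def solution (numbers : List Int) (k : Int) : Int :=
  PySem.List.pyGetD numbers
    ((PySem.List.pyRange 0 (k - 1) 1).foldl
      (fun answer _i =>
        if answer < (numbers.length : Int) - 2 then answer + 2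
        else if answer = (numbers.length : Int) - 2 then 0
        else if answer = (numbers.length : Int) - 1 then 1
        else answer) 0) 0

-- ===== PORT B =====
def solution_alt (numbers : List Int) (k : Int) : Int :=
  PySem.List.pyGetD numbers (PySem.Int.mod (2 * (max k 1 - 1)) (numbers.length : Int)) 0

-- ===== PRECONDITION & SPEC =====
-- Pre_ excludes exactly the inputs where Python A raises: the empty list (IndexError / B's
-- ZeroDivisionError) and the one-element list with k ≥ 2 (A's loop reaches index 1, IndexError).
def Pre_solution (numbers : List Int) (k : Int) : Prop :=
  numbers ≠ [] ∧ (numbers.length = 1 → k ≤ 1)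
instance (numbers : List Int) (k : Int) : Decidable (Pre_solution numbers k) := by
  unfold Pre_solution; infer_instance
def pvWitness_solution : List Int × Int := ([10, 20, 30, 40], 5)

def Spec_solution (numbers : List Int) (k : Int) (out : Int) : Prop := out = solution_alt numbers k
instance (numbers : List Int) (k : Int) (out : Int) : Decidable (Spec_solution numbers k out) := by unfold Spec_solution; infer_instance

-- ===== CLAIM (what is proved, stated in full; the proofs are below) =====
def Claim_equal_solution : Prop := ∀ (numbers : List Int) (k : Int), Dom_solution numbers k → Pre_solution numbers k → Spec_solution numbers k (solution numbers k)

-- ===== LEMMAS AND PROOFS =====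

-- One loop step on an in-range accumulator is +2 modulo n (for n ≥ 2).
lemma step_eq_mod (n a : Int) (hn : 2 ≤ n) (h0 : 0 ≤ a) (h1 : a < n) :
    (if a < n - 2 then a + 2 else if a = n - 2 then 0 else if a = n - 1 then 1 else a)
      = (a + 2) % n := by
  split_ifs with h2 h3 h4
  · exact (Int.emod_eq_of_lt (by omega) (by omega)).symm
  · subst h3
    have : n - 2 + 2 = n := by ring
    rw [this, Int.emod_self]
  · subst h4
    have : n - 1 + 2 = 1 + n * 1 := by ring
    rw [this, Int.add_mul_emod_self_left, Int.emod_eq_of_lt (by omega) (by omega)]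
  · omega

-- Folding the step over any list only depends on its length: it adds 2·length modulo n.
lemma foldl_step (n : Int) (hn : 2 ≤ n) (l : List Int) (a : Int) (h0 : 0 ≤ a) (h1 : a < n) :
    l.foldl (fun answer _i =>
        if answer < n - 2 then answer + 2
        else if answer = n - 2 then 0
        else if answer = n - 1 then 1
        else answer) a
      = (a + 2 * l.length) % n := by
  induction l generalizing a with
  | nil => simpa using (Int.emod_eq_of_lt h0 h1).symm
  | cons x xs ih =>
      simp only [List.foldl_cons, List.length_cons]
      rw [step_eq_mod n a hn h0 h1,
        ih ((a + 2) % n) (Int.emod_nonneg _ (by omega)) (Int.emod_lt_of_pos _ (by omega)),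
        Int.emod_add_emod]
      congr 1
      push_cast
      ring

-- ===== VERDICT (by name: the statement is the Claim_ definition above) =====
theorem solution_spec : Claim_equal_solution := by
  intro numbers k _hdom hpre
  obtain ⟨hne, hone⟩ := hpre
  have hnpos : 0 < (numbers.length : Int) := by
    simpa using List.length_pos_iff.mpr hne
  unfold Spec_solution solution solution_alt
  rw [PySem.Int.mod_eq_emod_of_pos hnpos]
  by_cases hk : k ≤ 1
  · have hmax : max k 1 = 1 := by omega
    rw [PySem.List.pyRange_one_eq_nil (by omega), hmax]
    norm_num
  · have hn2 : 2 ≤ (numbers.length : Int) := by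
      rcases Nat.lt_or_ge numbers.length 2 with h | h
      · interval_cases h' : numbers.length <;> omega
      · exact_mod_cast h
    rw [foldl_step _ hn2 _ 0 le_rfl (by omega), PySem.List.length_pyRange_one]
    have harg : (0 + 2 * (((k - 1 - 0).toNat : Int))) = 2 * (max k 1 - 1) := by omega
    rw [harg]
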